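-- pv_equiv track=rewrite | github.com/epangar/python-w3.exercises | String/1-10/4.py | style_str
-- ===== SOURCE A (Python) =====
-- def style_str(str):
--     first = str[0]
--     str_len = len(str)
--
--     answer = ""
--
--     for i in range(0, str_len):
--         char = str[i]
--
--         if i == 0:
--             answer += char
--         elif i > 0 and char == first:
--             answer += '$'
--         else:
--             answer += char
--     return answer
-- ===== SOURCE B (Python) =====
-- def style_str(str):
--     first = str[0]
--     segments = str[1:].split(first)
--     return first + '$'.join(segments)
-- ===== Notes on version B (the rewrite author's own statement) =====
-- stated objective: alternative
-- what changed: Replaces the explicit index loop with per-character if/elif branching by a split/join decomposition: the tail is split into the segments between occurrences of the first character and rejoined with '$'.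
import Mathlib
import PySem

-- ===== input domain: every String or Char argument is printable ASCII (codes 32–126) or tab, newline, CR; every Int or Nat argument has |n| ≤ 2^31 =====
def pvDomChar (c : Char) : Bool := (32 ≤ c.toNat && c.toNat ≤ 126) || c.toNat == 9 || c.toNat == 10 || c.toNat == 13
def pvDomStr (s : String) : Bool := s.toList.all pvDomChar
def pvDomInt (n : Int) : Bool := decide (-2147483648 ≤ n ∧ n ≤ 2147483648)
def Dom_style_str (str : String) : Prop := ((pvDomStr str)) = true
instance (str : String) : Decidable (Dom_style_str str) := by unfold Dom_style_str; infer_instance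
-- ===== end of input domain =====

-- B replaces A's index loop (per-character if/elif) by a split/join decomposition: split the tail on the first character, rejoin with '$'; objective: alternative.


-- ===== PORT A =====
def style_str (str : String) : String :=
  match PySem.Str.pyGet? str 0 with       -- first = str[0]  (none = IndexError, excluded by Pre_)
  | none => ""
  | some first =>
    let cs := str.toList
    let str_len := cs.length              -- str_len = len(str)
    let answer : List Char :=             -- answer = ""
      (PySem.List.pyRange 0 str_len 1).foldl (fun answer i =>
        let char := PySem.List.pyGetD cs i ' '      -- char = str[i]; i is in range for i in range(0, str_len)
        if i == 0 then answer ++ [char]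
        else if (decide (i > 0)) && (char == first) then answer ++ ['$']
        else answer ++ [char]) []
    String.ofList answer

-- ===== PORT B =====
def style_str_alt (str : String) : String :=
  match PySem.Str.pyGet? str 0 with       -- first = str[0]
  | none => ""
  | some first =>
    -- segments = str[1:].split(first); return first + '$'.join(segments)
    let segments := PySem.Chars.splitOn (PySem.Chars.slice str.toList (some 1) none) [first]
    String.ofList (first :: PySem.Chars.join ['$'] segments)

-- ===== PRECONDITION & SPEC =====
-- Python A raises IndexError on the empty string (str[0]); B raises there too.
def Pre_style_str (str : String) : Prop := str ≠ ""
instance (str : String) : Decidable (Pre_style_str str) := by unfold Pre_style_str; infer_instance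
def pvWitness_style_str : String := "hello"

def Spec_style_str (str : String) (out : String) : Prop := out = style_str_alt str
instance (str : String) (out : String) : Decidable (Spec_style_str str out) := by unfold Spec_style_str; infer_instance

-- ===== CLAIM (what is proved, stated in full; the proofs are below) =====
def Claim_equal_style_str : Prop := ∀ (str : String), Dom_style_str str → Pre_style_str str → Spec_style_str str (style_str str)

-- ===== LEMMAS AND PROOFS =====

-- the segments of l between occurrences of c, with an accumulator for the current segment
def segSplit (c : Char) : List Char → List Char → List (List Char)
  | [], cur => [cur.reverse]
  | x :: t, cur => if x = c then cur.reverse :: segSplit c t [] else segSplit c t (x :: cur)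

theorem segSplit_ne_nil (c : Char) : ∀ (l cur : List Char), segSplit c l cur ≠ [] := by
  intro l
  induction l with
  | nil => intro cur; simp [segSplit]
  | cons x t ih =>
    intro cur
    by_cases hx : x = c <;> simp [segSplit, hx, ih]

-- PySem's fueled split on a single-character separator computes segSplit
theorem splitOn_go_eq (c : Char) :
    ∀ (l : List Char) (fuel : Nat) (cur : List Char) (acc : List (List Char)),
      l.length ≤ fuel →
      PySem.Chars.splitOn.go [c] fuel l cur acc = acc.reverse ++ segSplit c l cur := by
  intro l
  induction l with
  | nil =>
    intro fuel cur acc _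
    cases fuel <;> simp [PySem.Chars.splitOn.go, segSplit]
  | cons x t ih =>
    intro fuel cur acc hf
    cases fuel with
    | zero => simp at hf
    | succ fuel =>
      rw [PySem.Chars.splitOn.go]
      by_cases hx : x = c
      · subst hx
        simp only [List.isPrefixOf, BEq.rfl, Bool.true_and, if_pos]
        have hd : List.drop [x].length (x :: t) = t := by simp
        rw [hd, ih fuel [] (cur.reverse :: acc) (Nat.le_of_succ_le_succ hf)]
        simp [segSplit]
      · have hp : ([c].isPrefixOf (x :: t)) = false := by
          simp [List.isPrefixOf, Ne.symm hx]
        rw [hp]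
        simp only [Bool.false_eq_true, if_false]
        rw [ih fuel (x :: cur) acc (Nat.le_of_succ_le_succ hf)]
        simp [segSplit, hx]

-- rejoining the segments with '$' is the pointwise substitution of c by '$'
theorem join_segSplit (c : Char) :
    ∀ (l cur : List Char),
      PySem.Chars.join ['$'] (segSplit c l cur)
        = cur.reverse ++ l.map (fun x => if x == c then '$' else x) := by
  intro l
  induction l with
  | nil =>
    intro cur
    simp [segSplit, PySem.Chars.join, List.intercalate]
  | cons x t ih =>
    intro cur
    by_cases hx : x = c
    · subst hx
      obtain ⟨h, ts, hh⟩ := List.exists_cons_of_ne_nil (segSplit_ne_nil x t [])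
      simp only [segSplit]
      rw [PySem.Chars.join, hh, List.intercalate]
      have := ih []
      rw [PySem.Chars.join, hh] at this
      simp only [List.intercalate] at this
      simp [this]
    · simp only [segSplit, if_neg hx]
      rw [ih (x :: cur)]
      simp [hx]

-- single-character split-then-join is the pointwise substitution
theorem join_splitOn_single (c : Char) (l : List Char) :
    PySem.Chars.join ['$'] (PySem.Chars.splitOn l [c])
      = l.map (fun x => if x == c then '$' else x) := by
  rw [PySem.Chars.splitOn, splitOn_go_eq c l (l.length + 1) [] [] (by omega)]
  simpa using join_segSplit c l []

-- A's loop over the indices pre.length .. pre.length + rest.length - 1 maps the tail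
theorem loopA (first : Char) :
    ∀ (rest pre : List Char) (acc : List Char), pre ≠ [] →
      (PySem.List.pyRange (pre.length : Int) ((pre.length + rest.length : Nat) : Int) 1).foldl
        (fun answer i =>
          let char := PySem.List.pyGetD (pre ++ rest) i ' '
          if i == 0 then answer ++ [char]
          else if (decide (i > 0)) && (char == first) then answer ++ ['$']
          else answer ++ [char]) acc
      = acc ++ rest.map (fun x => if x == first then '$' else x) := by
  intro rest
  induction rest with
  | nil =>
    intro pre acc _
    simp [PySem.List.pyRange]
  | cons x rs ih =>
    intro pre acc hpre
    have hlt : (pre.length : Int) < ((pre.length + (x :: rs).length : Nat) : Int) := by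
      push_cast [List.length_cons]; omega
    rw [PySem.List.pyRange_one_cons hlt]
    simp only [List.foldl_cons]
    have hchar : PySem.List.pyGetD (pre ++ x :: rs) (pre.length : Int) ' ' = x := by
      rw [PySem.List.pyGetD_natCast]
      simp [List.getD]
    have hpos : pre.length ≠ 0 := by
      cases pre <;> simp_all
    have h0 : (((pre.length : Int)) == 0) = false := by
      simp [hpos]
    have hgt : (decide ((pre.length : Int) > 0)) = true := by
      simp [Nat.pos_of_ne_zero hpos]
    simp only [hchar, h0, hgt, Bool.false_eq_true, if_false, Bool.true_and]
    have harr : (pre ++ x :: rs) = (pre ++ [x]) ++ rs := by simp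
    have hlen : ((pre.length : Int) + 1) = (((pre ++ [x]).length : Nat) : Int) := by
      simp
    have hlen2 : ((pre.length + (x :: rs).length : Nat) : Int) = (((pre ++ [x]).length + rs.length : Nat) : Int) := by
      push_cast [List.length_cons, List.length_append, List.length_nil]; ring
    by_cases hx : x = first
    · subst hx
      simp only [BEq.rfl, if_pos]
      rw [harr, hlen, hlen2, ih (pre ++ [x]) (acc ++ ['$']) (by simp)]
      simp
    · have hb : (x == first) = false := by simp [hx]
      simp only [hb, Bool.false_eq_true, if_false]
      rw [harr, hlen, hlen2, ih (pre ++ [x]) (acc ++ [x]) (by simp)]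
      simp [hx]

-- ===== VERDICT (by name: the statement is the Claim_ definition above) =====
theorem style_str_spec : Claim_equal_style_str := by
  intro str _ hpre
  unfold Spec_style_str
  have hne : str.toList ≠ [] := by
    simpa using hpre
  obtain ⟨c, rest, hcs⟩ : ∃ c rest, str.toList = c :: rest := by
    cases h : str.toList with
    | nil => exact absurd h hne
    | cons c rest => exact ⟨c, rest, rfl⟩
  have hget : PySem.Str.pyGet? str 0 = some c := by
    simp [hcs]
  unfold style_str style_str_alt
  rw [hget]
  simp only [hcs]
  -- B side
  rw [PySem.Chars.slice_eq_listSlice, PySem.List.slice_from_one]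
  simp only [List.tail_cons]
  rw [join_splitOn_single]
  -- A side
  have h0 : PySem.List.pyRange 0 (((c :: rest).length : Nat) : Int) 1
      = (0 : Int) :: PySem.List.pyRange 1 (((c :: rest).length : Nat) : Int) 1 := by
    rw [PySem.List.pyRange_one_cons (by simp)]
    norm_num
  rw [h0]
  simp only [List.foldl_cons]
  have hchar0 : PySem.List.pyGetD (c :: rest) (0 : Int) ' ' = c := by
    simp [PySem.List.pyGetD_zero_cons]
  simp only [hchar0, BEq.rfl, if_pos, List.nil_append]
  have hstep := loopA c rest [c] [c] (by simp)
  simp only [List.length_cons, List.length_nil, List.singleton_append, Nat.zero_add] at hstep ⊢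
  have hc1 : ((1 + rest.length : Nat) : Int) = ((rest.length + 1 : Nat) : Int) := by
    push_cast; ring
  rw [hc1, show (((1:Nat)) : Int) = (1 : Int) from by norm_num] at hstep
  rw [hstep]
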